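-- pv_equiv track=rewrite | github.com/DanielTakeshi/debridement-code | autolab/data_collector.py | _not_duplicate
-- ===== SOURCE A (Python) =====
-- def _not_duplicate(duplicates, cX, cY, rtol):
--     """ Helper method for checking duplicates. """
--     if len(duplicates) == 0:
--         return True
--     for x in range(-rtol,rtol+1):
--         for y in range(-rtol,rtol+1):
--             if (x+cX, y+cY) in duplicates:
--                 # We're close enough that it's a duplicate.
--                 return False
--     return True
-- ===== SOURCE B (Python) =====
-- def _not_duplicate(duplicates, cX, cY, rtol):
--     """ Helper method for checking duplicates. """
--     for (px, py) in duplicates: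
--         if abs(px - cX) <= rtol and abs(py - cY) <= rtol:
--             return False
--     return True
-- ===== Notes on version B (the rewrite author's own statement) =====
-- stated objective: faster
-- what changed: B scans the stored points once and tests each with an absolute-difference bound, instead of enumerating the whole (2*rtol+1)^2 neighborhood grid and testing membership of each cell in the set.
import Mathlib
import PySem

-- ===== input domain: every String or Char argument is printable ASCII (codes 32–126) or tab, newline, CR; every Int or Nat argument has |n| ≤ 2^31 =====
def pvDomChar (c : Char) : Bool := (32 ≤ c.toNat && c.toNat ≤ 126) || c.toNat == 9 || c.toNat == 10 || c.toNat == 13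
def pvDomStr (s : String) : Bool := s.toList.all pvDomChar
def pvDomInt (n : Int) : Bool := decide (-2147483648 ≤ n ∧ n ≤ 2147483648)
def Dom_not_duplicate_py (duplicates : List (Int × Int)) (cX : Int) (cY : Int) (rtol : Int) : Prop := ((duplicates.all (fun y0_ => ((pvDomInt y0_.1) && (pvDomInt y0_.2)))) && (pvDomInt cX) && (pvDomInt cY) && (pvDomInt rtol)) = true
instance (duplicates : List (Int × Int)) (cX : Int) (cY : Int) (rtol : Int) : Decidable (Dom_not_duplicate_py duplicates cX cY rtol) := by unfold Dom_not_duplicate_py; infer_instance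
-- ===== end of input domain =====

-- ===== PORT A =====
-- Literal port of A: length guard, then enumerate the grid [-rtol, rtol]^2 and
-- return False on the first cell that is a member of `duplicates`.
def not_duplicate_py (duplicates : List (Int × Int)) (cX : Int) (cY : Int) (rtol : Int) : Bool :=
  if duplicates.length == 0 then true
  else if (PySem.List.pyRange (-rtol) (rtol + 1) 1).any (fun x =>
            (PySem.List.pyRange (-rtol) (rtol + 1) 1).any (fun y =>
              duplicates.contains (x + cX, y + cY)))
  then false else true

-- ===== PORT B =====
-- Port of B: one pass over the stored points, absolute-difference test.
def not_duplicate_py_alt (duplicates : List (Int × Int)) (cX : Int) (cY : Int) (rtol : Int) : Bool :=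
  duplicates.all (fun p => !(decide (|p.1 - cX| ≤ rtol) && decide (|p.2 - cY| ≤ rtol)))

-- ===== PRECONDITION & SPEC =====
def Spec_not_duplicate_py (duplicates : List (Int × Int)) (cX : Int) (cY : Int) (rtol : Int) (out : Bool) : Prop := out = not_duplicate_py_alt duplicates cX cY rtol
instance (duplicates : List (Int × Int)) (cX : Int) (cY : Int) (rtol : Int) (out : Bool) : Decidable (Spec_not_duplicate_py duplicates cX cY rtol out) := by unfold Spec_not_duplicate_py; infer_instance

-- ===== CLAIM (what is proved, stated in full; the proofs are below) =====
def Claim_equal_not_duplicate_py : Prop := ∀ (duplicates : List (Int × Int)) (cX : Int) (cY : Int) (rtol : Int), Dom_not_duplicate_py duplicates cX cY rtol → Spec_not_duplicate_py duplicates cX cY rtol (not_duplicate_py duplicates cX cY rtol)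

-- ===== LEMMAS AND PROOFS =====

-- The grid search finds a hit iff some stored point is within rtol in both coordinates.
theorem grid_hit_iff (duplicates : List (Int × Int)) (cX cY rtol : Int) :
    ((PySem.List.pyRange (-rtol) (rtol + 1) 1).any (fun x =>
        (PySem.List.pyRange (-rtol) (rtol + 1) 1).any (fun y =>
          duplicates.contains (x + cX, y + cY))) = true)
    ↔ ∃ p ∈ duplicates, |p.1 - cX| ≤ rtol ∧ |p.2 - cY| ≤ rtol := by
  simp only [List.any_eq_true, PySem.List.mem_pyRange_one, List.contains_iff_mem]
  constructor
  · rintro ⟨x, ⟨hx1, hx2⟩, y, ⟨hy1, hy2⟩, hmem⟩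
    refine ⟨(x + cX, y + cY), hmem, ?_, ?_⟩
    · show |x + cX - cX| ≤ rtol
      rw [abs_le]; omega
    · show |y + cY - cY| ≤ rtol
      rw [abs_le]; omega
  · rintro ⟨⟨px, py⟩, hmem, h1, h2⟩
    rw [abs_le] at h1 h2
    refine ⟨px - cX, ⟨by omega, by omega⟩, py - cY, ⟨by omega, by omega⟩, ?_⟩
    simpa using hmem

theorem ports_eq (duplicates : List (Int × Int)) (cX cY rtol : Int) :
    not_duplicate_py duplicates cX cY rtol = not_duplicate_py_alt duplicates cX cY rtol := by
  unfold not_duplicate_py not_duplicate_py_alt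
  rcases duplicates with _ | ⟨p, ds⟩
  · simp
  · rw [if_neg (by simp)]
    rw [Bool.eq_iff_iff]
    simp only [Bool.if_false_left, Bool.and_true, Bool.not_eq_true', decide_eq_false_iff_not]
    rw [grid_hit_iff (p :: ds) cX cY rtol]
    simp only [List.all_eq_true, not_exists, Bool.not_eq_true', Bool.and_eq_false_iff,
      decide_eq_false_iff_not]
    constructor
    · intro h q hq
      have := h q
      tauto
    · rintro h q ⟨hq, h1, h2⟩
      have := h q hq
      tauto

-- ===== VERDICT (by name: the statement is the Claim_ definition above) =====
theorem not_duplicate_py_spec : Claim_equal_not_duplicate_py := by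
  intro duplicates cX cY rtol _
  unfold Spec_not_duplicate_py
  exact ports_eq duplicates cX cY rtol
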